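-- pv_equiv track=rewrite | github.com/Selk-bit/PinJobs-Backend | candidates/views.py | distribute_ads
-- ===== SOURCE A (Python) =====
-- def distribute_ads(jobs, ads, ads_per_page):
--     """
--     Distribute ads evenly among jobs with a reasonable distance.
--     """
--     if not ads or ads_per_page == 0:
--         return jobs
--
--     results = list(jobs)
--     ad_count = len(ads)
--     total_positions = len(results) + ad_count
--     step = max(1, total_positions // (ad_count + 1))
--
--     ad_index = 0
--     for i in range(step, total_positions, step):
--         if ad_index < ad_count:
--             index = min(i, len(results))  # Ensure we don’t go out of bounds
--             results.insert(index, ads[ad_index])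
--             ad_index += 1
--
--     return results
-- ===== SOURCE B (Python) =====
-- def distribute_ads(jobs, ads, ads_per_page):
--     """
--     Distribute ads evenly among jobs; single pass emitting chunks of jobs
--     between precomputed ad cut points (no O(n) list.insert per ad).
--     """
--     if not ads or ads_per_page == 0:
--         return jobs
--     n = len(jobs)
--     ad_count = len(ads)
--     total_positions = n + ad_count
--     step = max(1, total_positions // (ad_count + 1))
--     positions = list(range(step, total_positions, step))[:ad_count]
--     out = []
--     prev = 0
--     for j, i in enumerate(positions):
--         cut = min(i - j, n)
--         out.extend(jobs[prev:cut])
--         out.append(ads[j])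
--         prev = cut
--     out.extend(jobs[prev:])
--     return out
-- ===== Notes on version B (the rewrite author's own statement) =====
-- stated objective: faster
-- what changed: B computes each ad's cut point into jobs arithmetically and emits the result in one pass of chunk concatenations, instead of A's repeated O(n) list.insert into a growing results list.
import Mathlib
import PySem

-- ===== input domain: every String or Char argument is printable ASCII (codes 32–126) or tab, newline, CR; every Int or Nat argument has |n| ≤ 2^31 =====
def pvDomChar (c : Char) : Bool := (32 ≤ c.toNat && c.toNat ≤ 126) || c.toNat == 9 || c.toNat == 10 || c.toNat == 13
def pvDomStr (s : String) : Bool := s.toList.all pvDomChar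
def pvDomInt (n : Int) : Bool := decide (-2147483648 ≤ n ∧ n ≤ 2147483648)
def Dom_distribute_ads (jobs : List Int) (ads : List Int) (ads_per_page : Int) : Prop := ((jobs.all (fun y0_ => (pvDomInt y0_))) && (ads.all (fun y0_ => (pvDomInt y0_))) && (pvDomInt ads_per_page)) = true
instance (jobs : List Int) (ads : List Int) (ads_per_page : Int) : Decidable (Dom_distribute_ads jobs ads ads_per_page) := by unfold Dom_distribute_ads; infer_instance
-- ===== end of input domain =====

-- B replaces A's repeated list.insert by a single pass emitting the chunks of jobs
-- between precomputed ad cut points; same return value.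

-- ===== PORT A =====
def distribute_ads (jobs : List Int) (ads : List Int) (ads_per_page : Int) : List Int :=
  if ads = [] ∨ ads_per_page = 0 then jobs
  else
    let results := jobs
    let ad_count : Int := ads.length
    let total_positions : Int := (results.length : Int) + ad_count
    let step : Int := max 1 (PySem.Int.floordiv total_positions (ad_count + 1))
    let st := (PySem.List.pyRange step total_positions step).foldl
      (fun (st : List Int × Int) i =>
        if st.2 < ad_count then
          (PySem.List.insert st.1 (min i (st.1.length : Int)) (PySem.List.pyGetD ads st.2 0), st.2 + 1)
        else st)
      (results, 0)
    st.1

-- ===== PORT B =====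
def distribute_ads_alt (jobs : List Int) (ads : List Int) (ads_per_page : Int) : List Int :=
  if ads = [] ∨ ads_per_page = 0 then jobs
  else
    let n : Int := jobs.length
    let ad_count : Int := ads.length
    let total_positions : Int := n + ad_count
    let step : Int := max 1 (PySem.Int.floordiv total_positions (ad_count + 1))
    let positions := PySem.List.slice (PySem.List.pyRange step total_positions step) none (some ad_count)
    let st := (PySem.List.enumerate positions).foldl
      (fun (st : List Int × Int) ji =>
        let cut := min (ji.2 - ji.1) n
        (st.1 ++ PySem.List.slice jobs (some st.2) (some cut) ++ [PySem.List.pyGetD ads ji.1 0], cut))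
      ([], 0)
    st.1 ++ PySem.List.slice jobs (some st.2) none

-- ===== PRECONDITION & SPEC =====
def Spec_distribute_ads (jobs : List Int) (ads : List Int) (ads_per_page : Int) (out : List Int) : Prop := out = distribute_ads_alt jobs ads ads_per_page
instance (jobs : List Int) (ads : List Int) (ads_per_page : Int) (out : List Int) : Decidable (Spec_distribute_ads jobs ads ads_per_page out) := by unfold Spec_distribute_ads; infer_instance

-- ===== CLAIM (what is proved, stated in full; the proofs are below) =====
def Claim_equal_distribute_ads : Prop := ∀ (jobs : List Int) (ads : List Int) (ads_per_page : Int), Dom_distribute_ads jobs ads ads_per_page → Spec_distribute_ads jobs ads ads_per_page (distribute_ads jobs ads ads_per_page)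

-- ===== LEMMAS AND PROOFS =====

-- A's loop, abstracted: insert each (ad, position) pair at min(position, current length).
def pvAF : List (Int × Int) → List Int → List Int
  | [], res => res
  | (a, p) :: rest, res => pvAF rest (PySem.List.insert res (min p (res.length : Int)) a)

-- "first element ≥ low; successive elements increase by at least 1"
def pvIncr : Int → List Int → Prop
  | _, [] => True
  | low, p :: ps => low ≤ p ∧ pvIncr (p + 1) ps

-- common middle form: chunked interleaving with relative cut points
def pvMid : List Int → List Int → List Int → List Int
  | [], _, jobs => jobs
  | _ :: _, [], jobs => jobs
  | a :: ads, p :: ps, jobs =>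
      jobs.take (min p.toNat jobs.length) ++ a ::
        pvMid ads (ps.map (fun x => x - (((min p.toNat jobs.length : Nat) : Int) + 1)))
          (jobs.drop (min p.toNat jobs.length))

theorem pvMid_nil_ps (ads jobs : List Int) : pvMid ads [] jobs = jobs := by
  cases ads <;> rfl

theorem pvIncr_mono {low low' : Int} (h : low' ≤ low) : ∀ {ps : List Int}, pvIncr low ps → pvIncr low' ps
  | [], _ => trivial
  | _ :: _, ⟨h1, h2⟩ => ⟨le_trans h h1, h2⟩

theorem pvIncr_le_of_mem : ∀ {ps : List Int} {low x : Int}, pvIncr low ps → x ∈ ps → low ≤ x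
  | p :: ps, low, x, ⟨h1, h2⟩, hm => by
    rcases List.mem_cons.mp hm with h | h
    · omega
    · have := pvIncr_le_of_mem h2 h; omega

theorem pvIncr_map_sub {c : Int} : ∀ {ps : List Int} {low : Int}, pvIncr low ps → pvIncr (low - c) (ps.map (fun x => x - c))
  | [], _, _ => trivial
  | p :: ps, low, ⟨h1, h2⟩ => by
    simp only [List.map_cons]
    refine ⟨by omega, ?_⟩
    have h3 := pvIncr_map_sub (c := c) h2
    have he : p + 1 - c = p - c + 1 := by ring
    rwa [he] at h3

theorem pvIncr_take {k : Nat} : ∀ {ps : List Int} {low : Int}, pvIncr low ps → pvIncr low (ps.take k)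
  | [], _, _ => by simp [pvIncr]
  | p :: ps, low, h => by
    cases k with
    | zero => simp [pvIncr]
    | succ k => exact ⟨h.1, pvIncr_take h.2⟩

theorem pvIncr_range_map : ∀ (m : Nat) (c low s : Int), 1 ≤ s → low ≤ c →
    pvIncr low ((List.range m).map (fun (k : Nat) => c + s * ((k : Nat) : Int)))
  | 0, _, _, _, _, _ => trivial
  | m + 1, c, low, s, hs, hc => by
    rw [List.range_succ_eq_map, List.map_cons]
    refine ⟨by simpa using hc, ?_⟩
    have h2 := pvIncr_range_map m (c + s) (c + 1) s hs (by omega)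
    have heq : List.map ((fun (k : Nat) => c + s * ((k : Nat) : Int)) ∘ Nat.succ) (List.range m)
        = List.map (fun (k : Nat) => c + s + s * ((k : Nat) : Int)) (List.range m) := by
      apply List.map_congr_left
      intro k _
      simp [Function.comp, Nat.succ_eq_add_one]
      ring
    rw [List.map_map, heq]
    have h0 : c + s * ((0 : Nat) : Int) + 1 = c + 1 := by simp
    rw [h0]
    exact h2

theorem pv_zip_take_right : ∀ (l1 l2 : List Int), l1.zip (l2.take l1.length) = l1.zip l2
  | [], _ => by simp
  | _ :: _, [] => by simp
  | a :: l1, b :: l2 => by simp [pv_zip_take_right l1 l2]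

theorem pv_zip_map_right (f : Int → Int) : ∀ (l1 l2 : List Int),
    (l1.zip l2).map (fun x => (x.1, f x.2)) = l1.zip (l2.map f)
  | [], _ => by simp
  | _ :: _, [] => by simp
  | a :: l1, b :: l2 => by simp [pv_zip_map_right f l1 l2]

theorem pv_insert_append_left (P suf : List Int) (m : Int) (a : Int)
    (h1 : (P.length : Int) ≤ m) (h2 : m ≤ (P.length : Int) + (suf.length : Int)) :
    PySem.List.insert (P ++ suf) m a = P ++ PySem.List.insert suf (m - (P.length : Int)) a := by
  lift m to Nat using (by omega : (0 : Int) ≤ m) with km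
  have hm2 : (km : Int) - (P.length : Int) = (((km - P.length : Nat) : Nat) : Int) := by omega
  rw [hm2, PySem.List.insert_natCast _ _ _ (by simp; omega),
      PySem.List.insert_natCast _ _ _ (by omega)]
  have hp : P.length ≤ km := by omega
  rw [List.take_append, List.drop_append]
  simp [List.take_of_length_le hp, List.drop_of_length_le hp]

theorem pvAF_append : ∀ (pairs : List (Int × Int)) (P suf : List Int),
    (∀ x ∈ pairs, (P.length : Int) ≤ x.2) →
    pvAF pairs (P ++ suf) = P ++ pvAF (pairs.map (fun x => (x.1, x.2 - (P.length : Int)))) suf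
  | [], P, suf, _ => by simp [pvAF]
  | (a, p) :: rest, P, suf, h => by
    have hp : (P.length : Int) ≤ p := h (a, p) (by simp)
    have hlen : ((P ++ suf).length : Int) = (P.length : Int) + (suf.length : Int) := by
      simp
    have hmin : (P.length : Int) ≤ min p ((P ++ suf).length : Int) := by
      rw [hlen]; simp; omega
    have hle : min p ((P ++ suf).length : Int) ≤ (P.length : Int) + (suf.length : Int) := by
      rw [hlen]; simp
    simp only [pvAF, List.map_cons]
    rw [pv_insert_append_left _ _ _ _ hmin hle]
    have hmin2 : min p ((P ++ suf).length : Int) - (P.length : Int)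
        = min (p - (P.length : Int)) ((suf.length : Int)) := by
      rw [hlen]; omega
    rw [hmin2]
    exact pvAF_append rest P _ (fun x hx => h x (by simp [hx]))

theorem pv_afold_eq (ads : List Int) : ∀ (ps res : List Int) (k : Int), 0 ≤ k →
    ((ps.foldl (fun (st : List Int × Int) i =>
        if st.2 < (ads.length : Int) then
          (PySem.List.insert st.1 (min i (st.1.length : Int)) (PySem.List.pyGetD ads st.2 0), st.2 + 1)
        else st) (res, k)).1)
    = pvAF ((ads.drop k.toNat).zip ps) res
  | [], res, k, hk => by simp [pvAF]
  | i :: ps, res, k, hk => by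
    rw [List.foldl_cons]
    by_cases hlt : k < (ads.length : Int)
    · rw [if_pos hlt]
      have hdrop : ads.drop k.toNat = ads[k.toNat] :: ads.drop (k.toNat + 1) :=
        List.drop_eq_getElem_cons (by omega)
      have hget : PySem.List.pyGetD ads k 0 = ads[k.toNat] :=
        PySem.List.pyGetD_eq_getElem ads 0 hk (by omega)
      rw [hdrop, List.zip_cons_cons]
      simp only [pvAF, hget]
      have := pv_afold_eq ads ps (PySem.List.insert res (min i (res.length : Int)) ads[k.toNat]) (k + 1) (by omega)
      have hk1 : (k + 1).toNat = k.toNat + 1 := by omega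
      rw [hk1] at this
      exact this
    · rw [if_neg hlt]
      have hdrop : ads.drop k.toNat = [] := List.drop_eq_nil_of_le (by omega)
      have := pv_afold_eq ads ps res k hk
      rw [hdrop] at this ⊢
      simpa [pvAF] using this

theorem pvAF_eq_mid : ∀ (ads ps jobs : List Int), pvIncr 0 ps →
    pvAF (ads.zip ps) jobs = pvMid ads ps jobs
  | [], ps, jobs, _ => by cases ps <;> simp [pvAF, pvMid]
  | _ :: _, [], jobs, _ => by simp [pvAF, pvMid]
  | a :: ads, p :: ps, jobs, h => by
    obtain ⟨h0, h1⟩ := h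
    have hq : min p ((jobs.length : Int)) = ((min p.toNat jobs.length : Nat) : Int) := by
      omega
    rw [List.zip_cons_cons]
    simp only [pvAF]
    rw [hq, PySem.List.insert_natCast _ _ _ (by omega)]
    have hsplit : List.take (min p.toNat jobs.length) jobs ++ a :: List.drop (min p.toNat jobs.length) jobs
        = (List.take (min p.toNat jobs.length) jobs ++ [a]) ++ List.drop (min p.toNat jobs.length) jobs := by
      simp
    rw [hsplit]
    have hPlen : ((List.take (min p.toNat jobs.length) jobs ++ [a]).length : Int)
        = ((min p.toNat jobs.length : Nat) : Int) + 1 := by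
      simp [List.length_take]
    rw [pvAF_append _ _ _ (by
      intro x hx
      have hx2 := (List.of_mem_zip hx).2
      have := pvIncr_le_of_mem h1 hx2
      rw [hPlen]
      omega)]
    rw [hPlen]
    have hmap : (ads.zip ps).map (fun x => (x.1, x.2 - (((min p.toNat jobs.length : Nat) : Int) + 1)))
        = ads.zip (ps.map (fun x => x - (((min p.toNat jobs.length : Nat) : Int) + 1))) :=
      pv_zip_map_right (fun x => x - (((min p.toNat jobs.length : Nat) : Int) + 1)) ads ps
    rw [hmap]
    have hincr : pvIncr 0 (ps.map (fun x => x - (((min p.toNat jobs.length : Nat) : Int) + 1))) := by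
      have := pvIncr_map_sub (c := ((min p.toNat jobs.length : Nat) : Int) + 1) h1
      exact pvIncr_mono (by omega) this
    rw [pvAF_eq_mid ads _ _ hincr]
    simp [pvMid]

theorem pv_bF_eq (jobs ads : List Int) : ∀ (psT : List Int) (j prev : Int) (out : List Int),
    0 ≤ prev → prev ≤ (jobs.length : Int) → 0 ≤ j → j.toNat + psT.length ≤ ads.length →
    pvIncr (prev + j) psT →
    (let st := (PySem.List.enumerate psT j).foldl
        (fun (st : List Int × Int) ji =>
          (st.1 ++ PySem.List.slice jobs (some st.2) (some (min (ji.2 - ji.1) (jobs.length : Int)))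
             ++ [PySem.List.pyGetD ads ji.1 0], min (ji.2 - ji.1) (jobs.length : Int)))
        (out, prev);
     st.1 ++ PySem.List.slice jobs (some st.2) none)
    = out ++ pvMid (ads.drop j.toNat) (psT.map (fun x => x - (prev + j))) (jobs.drop prev.toNat)
  | [], j, prev, out, hp0, hpn, hj, hlen, hincr => by
    simp only [PySem.List.enumerate_nil, List.foldl_nil, List.map_nil, pvMid_nil_ps]
    rw [PySem.List.slice_from _ hp0]
  | p :: ps, j, prev, out, hp0, hpn, hj, hlen, hincr => by
    obtain ⟨h0, h1⟩ := hincr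
    rw [PySem.List.enumerate_cons, List.foldl_cons]
    have hcut0 : 0 ≤ min (p - j) (jobs.length : Int) := by omega
    have hcutn : min (p - j) (jobs.length : Int) ≤ (jobs.length : Int) := by omega
    have hlen1 : (j + 1).toNat + ps.length ≤ ads.length := by
      simp only [List.length_cons] at hlen; omega
    have hincr1 : pvIncr (min (p - j) (jobs.length : Int) + (j + 1)) ps :=
      pvIncr_mono (by omega) h1
    have IH := pv_bF_eq jobs ads ps (j + 1) (min (p - j) (jobs.length : Int))
      (out ++ PySem.List.slice jobs (some prev) (some (min (p - j) (jobs.length : Int)))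
        ++ [PySem.List.pyGetD ads j 0])
      hcut0 hcutn (by omega) hlen1 hincr1
    have hj1 : (j + 1).toNat = j.toNat + 1 := by omega
    rw [hj1] at IH
    simp only at IH ⊢
    rw [IH]
    -- now rewrite the RHS into the same shape
    have hdropa : ads.drop j.toNat = ads[j.toNat] :: ads.drop (j.toNat + 1) :=
      List.drop_eq_getElem_cons (by simp only [List.length_cons] at hlen; omega)
    have hget : PySem.List.pyGetD ads j 0 = ads[j.toNat] :=
      PySem.List.pyGetD_eq_getElem ads 0 hj (by simp only [List.length_cons] at hlen; omega)
    rw [hdropa, List.map_cons]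
    simp only [pvMid]
    -- abbreviations
    have hq : ((min (p - (prev + j)).toNat (jobs.drop prev.toNat).length : Nat) : Int)
        = min (p - j) (jobs.length : Int) - prev := by
      simp [List.length_drop]; omega
    have hqnat : min (p - (prev + j)).toNat (jobs.drop prev.toNat).length
        = (min (p - j) (jobs.length : Int)).toNat - prev.toNat := by omega
    have htake : List.take (min (p - (prev + j)).toNat (jobs.drop prev.toNat).length) (jobs.drop prev.toNat)
        = PySem.List.slice jobs (some prev) (some (min (p - j) (jobs.length : Int))) := by
      rw [PySem.List.slice_toNat _ hp0 hcut0, hqnat]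
    have hdropq : List.drop (min (p - (prev + j)).toNat (jobs.drop prev.toNat).length) (jobs.drop prev.toNat)
        = jobs.drop (min (p - j) (jobs.length : Int)).toNat := by
      rw [List.drop_drop, hqnat]
      congr 1
      omega
    have hmaps : (ps.map (fun x => x - (prev + j))).map
          (fun x => x - (((min (p - (prev + j)).toNat (jobs.drop prev.toNat).length : Nat) : Int) + 1))
        = ps.map (fun x => x - (min (p - j) (jobs.length : Int) + (j + 1))) := by
      rw [List.map_map]
      apply List.map_congr_left
      intro x _
      simp [Function.comp]
      omega
    rw [htake, hdropq, hmaps, hget]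
    simp

theorem pv_take_natCast (l : List Int) (k : Nat) :
    PySem.List.slice l none (some ((k : Nat) : Int)) = l.take k := by
  rw [PySem.List.slice_to _ (by omega)]
  simp

-- ===== VERDICT (by name: the statement is the Claim_ definition above) =====
theorem distribute_ads_spec : Claim_equal_distribute_ads := by
  intro jobs ads ads_per_page _hdom
  unfold Spec_distribute_ads distribute_ads distribute_ads_alt
  by_cases hg : ads = [] ∨ ads_per_page = 0
  · rw [if_pos hg, if_pos hg]
  · rw [if_neg hg, if_neg hg]
    simp only []
    set T : Int := ((jobs.length : Int)) + (ads.length : Int) with hT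
    set s : Int := max 1 (PySem.Int.floordiv T ((ads.length : Int) + 1)) with hs
    have hs1 : 1 ≤ s := le_max_left _ _
    -- the full position list and its monotonicity
    have hfull : pvIncr 0 (PySem.List.pyRange s T s) := by
      rw [PySem.List.pyRange_of_pos _ _ (by omega)]
      exact pvIncr_range_map _ s 0 s hs1 (by omega)
    -- B's truncated position list
    have hslice : PySem.List.slice (PySem.List.pyRange s T s) none (some ((ads.length : Nat) : Int))
        = (PySem.List.pyRange s T s).take ads.length := pv_take_natCast _ _
    -- A side
    have hA := pv_afold_eq ads (PySem.List.pyRange s T s) jobs 0 (by omega)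
    simp only [Int.toNat_zero, List.drop_zero] at hA
    have hzip : ads.zip (PySem.List.pyRange s T s)
        = ads.zip ((PySem.List.pyRange s T s).take ads.length) :=
      (pv_zip_take_right ads _).symm
    rw [hzip] at hA
    have hAmid := pvAF_eq_mid ads ((PySem.List.pyRange s T s).take ads.length) jobs
      (pvIncr_take hfull)
    -- B side
    have hB := pv_bF_eq jobs ads ((PySem.List.pyRange s T s).take ads.length) 0 0 []
      (by omega) (by omega) (by omega) (by simp [List.length_take])
      (by simpa using pvIncr_take hfull)
    simp only [Int.toNat_zero, List.drop_zero, List.nil_append, add_zero, sub_zero] at hB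
    rw [hslice]
    rw [hA, hAmid]
    rw [hB]
    simp
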